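-- pv_equiv track=rewrite | github.com/tanushree-sharma/voice-test | livekit-test/langsmith_processor.py | _split_conversation_messages
-- ===== SOURCE A (Python) =====
-- def _split_conversation_messages(messages: list) -> tuple:
--     """
--     Split conversation messages into system, first user, and remaining messages.
--     Returns: (system_msg, first_user_msg, remaining_msgs)
--     """
--     system_msg = None
--     first_user_msg = None
--     remaining_msgs = []
--     first_user_found = False
--
--     for msg in messages:
--         role = msg.get("role", "") if isinstance(msg, dict) else "user"
--         if role == "system" and system_msg is None:
--             system_msg = msg
--         elif role == "user" and not first_user_found:
--             first_user_msg = msg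
--             first_user_found = True
--         elif first_user_found:
--             remaining_msgs.append(msg)
--
--     return (system_msg, first_user_msg, remaining_msgs)
-- ===== SOURCE B (Python) =====
-- def _split_conversation_messages(messages: list) -> tuple:
--     """
--     Split conversation messages into system, first user, and remaining messages.
--     Returns: (system_msg, first_user_msg, remaining_msgs)
--     """
--     roles = [m.get("role", "") if isinstance(m, dict) else "user" for m in messages]
--     sys_i = next((i for i, r in enumerate(roles) if r == "system"), None)
--     usr_i = next((i for i, r in enumerate(roles) if r == "user"), None)
--     system_msg = None if sys_i is None else messages[sys_i]
--     first_user_msg = None if usr_i is None else messages[usr_i]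
--     if usr_i is None:
--         remaining = []
--     else:
--         # the system message is reported separately, so it is not part of remaining
--         remaining = [messages[i] for i in range(usr_i + 1, len(messages)) if i != sys_i]
--     return (system_msg, first_user_msg, remaining)
-- ===== Notes on version B (the rewrite author's own statement) =====
-- stated objective: alternative
-- what changed: A's single stateful elif-chain loop (flags system_msg/first_user_found deciding which branch fires) is replaced by an index-based decomposition: find the first 'system' and first 'user' indices, pick the two messages by index, and build remaining as a comprehension over the indices after the first user, skipping the system message's index.
import Mathlib
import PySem

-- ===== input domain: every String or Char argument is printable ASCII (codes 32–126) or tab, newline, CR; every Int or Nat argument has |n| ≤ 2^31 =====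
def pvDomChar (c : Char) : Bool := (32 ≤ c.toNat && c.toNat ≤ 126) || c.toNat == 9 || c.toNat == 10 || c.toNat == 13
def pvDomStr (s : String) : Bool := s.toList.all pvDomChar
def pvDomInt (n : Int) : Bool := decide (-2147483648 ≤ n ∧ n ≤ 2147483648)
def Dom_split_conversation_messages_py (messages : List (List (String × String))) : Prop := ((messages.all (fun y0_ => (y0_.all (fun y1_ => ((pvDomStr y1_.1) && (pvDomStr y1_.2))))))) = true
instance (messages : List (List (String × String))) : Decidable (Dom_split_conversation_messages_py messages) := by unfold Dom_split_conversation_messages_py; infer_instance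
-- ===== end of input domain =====

-- B replaces A's stateful elif-chain loop by an index-based decomposition (first "system"/"user"
-- indices, then a comprehension over the indices after the first user, skipping the system index);
-- objective: alternative decomposition, same cost.

-- role of a message: msg.get("role", "") — at this type every msg is a dict, so the
-- `isinstance(msg, dict)` guard of both Pythons is always true and the "user" default is dead code
def pvRole (m : List (String × String)) : String := (PySem.Dict.mk m).getD "role" ""

-- ===== PORT A =====
-- the loop body of A (one `for msg in messages` step over the state (system_msg, first_user_msg, remaining_msgs, first_user_found))
def pvStepA (st : Option (List (String × String)) × Option (List (String × String)) × List (List (String × String)) × Bool)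
    (msg : List (String × String)) :
    Option (List (String × String)) × Option (List (String × String)) × List (List (String × String)) × Bool :=
  let role := pvRole msg
  if role == "system" && st.1.isNone then (some msg, st.2.1, st.2.2.1, st.2.2.2)
  else if role == "user" && !st.2.2.2 then (st.1, some msg, st.2.2.1, true)
  else if st.2.2.2 then (st.1, st.2.1, st.2.2.1 ++ [msg], st.2.2.2)
  else st

def split_conversation_messages_py (messages : List (List (String × String))) : (Option (List (String × String))) × (Option (List (String × String))) × (List (List (String × String))) :=
  let st := messages.foldl pvStepA (none, none, [], false)
  (st.1, st.2.1, st.2.2.1)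

-- ===== PORT B =====
def split_conversation_messages_py_alt (messages : List (List (String × String))) : (Option (List (String × String))) × (Option (List (String × String))) × (List (List (String × String))) :=
  let roles := messages.map pvRole
  -- next((i for i, r in enumerate(roles) if r == c), None) = index of first match
  let sysI := List.findIdx? (fun r => r == "system") roles
  let usrI := List.findIdx? (fun r => r == "user") roles
  let systemMsg := match sysI with | none => none | some i => messages[i]?   -- index always in range
  let firstUserMsg := match usrI with | none => none | some i => messages[i]?
  let remaining := match usrI with
    | none => ([] : List (List (String × String)))
    | some u =>
      -- [messages[i] for i in range(usr_i + 1, len(messages)) if i != sys_i]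
      ((PySem.List.pyRange ((u : Int) + 1) (messages.length : Int) 1).filter
          (fun i => sysI.map (fun (k : Nat) => (k : Int)) != some i)).map
        (fun i => PySem.List.pyGetD messages i [])
  (systemMsg, firstUserMsg, remaining)

-- ===== PRECONDITION & SPEC =====
def Spec_split_conversation_messages_py (messages : List (List (String × String))) (out : (Option (List (String × String))) × (Option (List (String × String))) × (List (List (String × String)))) : Prop := out = split_conversation_messages_py_alt messages
instance (messages : List (List (String × String))) (out : (Option (List (String × String))) × (Option (List (String × String))) × (List (List (String × String)))) : Decidable (Spec_split_conversation_messages_py messages out) := by unfold Spec_split_conversation_messages_py; infer_instance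

-- ===== CLAIM (what is proved, stated in full; the proofs are below) =====
def Claim_equal_split_conversation_messages_py : Prop := ∀ (messages : List (List (String × String))), Dom_split_conversation_messages_py messages → Spec_split_conversation_messages_py messages (split_conversation_messages_py messages)

-- ===== LEMMAS AND PROOFS =====

-- proof-only intermediate form of B's result: first indices picked the same way, remaining as
-- slice-after-first-user with the later first-system entry removed
def pvAltMid (messages : List (List (String × String))) : (Option (List (String × String))) × (Option (List (String × String))) × (List (List (String × String))) :=
  let roles := messages.map pvRole
  let sysI := List.findIdx? (fun r => r == "system") roles
  let usrI := List.findIdx? (fun r => r == "user") roles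
  let systemMsg := match sysI with | none => none | some i => messages[i]?
  let firstUserMsg := match usrI with | none => none | some i => messages[i]?
  let remaining := match usrI with
    | none => ([] : List (List (String × String)))
    | some u =>
      let tail := PySem.List.slice messages (some ((u : Int) + 1)) none
      match sysI with
      | some s => if u < s then tail.eraseIdx (s - u - 1) else tail
      | none => tail
  (systemMsg, firstUserMsg, remaining)

-- once first_user_found and system_msg are both set, A appends every remaining message
theorem pvA_both (t : List (List (String × String))) (s : List (String × String))
    (usr : Option (List (String × String))) (rem : List (List (String × String))) :
    t.foldl pvStepA (some s, usr, rem, true) = (some s, usr, rem ++ t, true) := by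
  induction t generalizing rem with
  | nil => simp
  | cons m t ih => simp [pvStepA, ih]

-- first_user_found but no system message yet: A grabs the first "system" message and appends the rest
theorem pvA_found (t : List (List (String × String)))
    (usr : Option (List (String × String))) (rem : List (List (String × String))) :
    t.foldl pvStepA (none, usr, rem, true) =
      match List.findIdx? (fun r => r == "system") (t.map pvRole) with
      | none => (none, usr, rem ++ t, true)
      | some j => (t[j]?, usr, rem ++ t.eraseIdx j, true) := by
  induction t generalizing rem with
  | nil => simp
  | cons m t ih =>
    by_cases hm : pvRole m = "system"
    · simp [pvStepA, hm, pvA_both, List.findIdx?_cons]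
    · have hb : (pvRole m == "system") = false := by simp [hm]
      simp only [List.foldl_cons, pvStepA, hb, Bool.false_and]
      rw [if_neg (by decide), if_neg (by simp), if_pos trivial, ih]
      simp only [List.map_cons, List.findIdx?_cons, hb]
      cases h : List.findIdx? (fun r => r == "system") (t.map pvRole) <;> simp

-- system message found but no user yet: A waits for the first "user", then appends everything after it
theorem pvA_sys (t : List (List (String × String))) (s : List (String × String))
    (usr : Option (List (String × String))) (rem : List (List (String × String))) :
    t.foldl pvStepA (some s, usr, rem, false) =
      match List.findIdx? (fun r => r == "user") (t.map pvRole) with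
      | none => (some s, usr, rem, false)
      | some j => (some s, t[j]?, rem ++ t.drop (j+1), true) := by
  induction t generalizing rem with
  | nil => simp
  | cons m t ih =>
    by_cases hm : pvRole m = "user"
    · simp [pvStepA, hm, pvA_both, List.findIdx?_cons]
    · have hb : (pvRole m == "user") = false := by simp [hm]
      simp only [List.foldl_cons, pvStepA]
      rw [if_neg (by simp), if_neg (by simp [hb]), if_neg (by simp), ih]
      simp only [List.map_cons, List.findIdx?_cons, hb]
      cases h : List.findIdx? (fun r => r == "user") (t.map pvRole) <;> simp

theorem pvSlice_drop (xs : List (List (String × String))) (u : Nat) :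
    PySem.List.slice xs (some ((u : Int) + 1)) none = xs.drop (u + 1) := by
  rw [show ((u : Int) + 1) = ((u + 1 : Nat) : Int) by push_cast; ring,
      PySem.List.slice_from_natCast]

theorem pvSlice_drop2 (xs : List (List (String × String))) (j : Nat) :
    PySem.List.slice xs (some ((j : Int) + 1 + 1)) none = xs.drop (j + 2) := by
  rw [show ((j : Int) + 1 + 1) = ((j + 2 : Nat) : Int) by push_cast; ring,
      PySem.List.slice_from_natCast]

theorem pvSlice_one (xs : List (List (String × String))) :
    PySem.List.slice xs (some 1) none = xs.tail := by
  rw [show (1 : Int) = ((1 : Nat) : Int) by norm_num, PySem.List.slice_from_natCast]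
  simp

theorem pvMainMid (messages : List (List (String × String))) :
    split_conversation_messages_py messages = pvAltMid messages := by
  induction messages with
  | nil => rfl
  | cons m t ih =>
    by_cases hs : pvRole m = "system"
    · simp only [split_conversation_messages_py, List.foldl_cons, pvStepA]
      rw [if_pos (by simp [hs])]
      rw [pvA_sys]
      simp only [pvAltMid, List.map_cons, List.findIdx?_cons]
      rw [if_pos (by simp [hs]), if_neg (by simp [hs])]
      cases h : List.findIdx? (fun r => r == "user") (t.map pvRole) with
      | none => simp
      | some j => simp [pvSlice_drop2, List.drop_succ_cons]
    · by_cases hu : pvRole m = "user"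
      · simp only [split_conversation_messages_py, List.foldl_cons, pvStepA]
        rw [if_neg (by simp [hs]), if_pos (by simp [hu])]
        rw [pvA_found]
        simp only [pvAltMid, List.map_cons, List.findIdx?_cons]
        rw [if_neg (by simp [hs]), if_pos (by simp [hu])]
        cases h : List.findIdx? (fun r => r == "system") (t.map pvRole) with
        | none => simp [pvSlice_one]
        | some j => simp [pvSlice_one]
      · have hA : split_conversation_messages_py (m :: t) = split_conversation_messages_py t := by
          simp only [split_conversation_messages_py, List.foldl_cons, pvStepA]
          rw [if_neg (by simp [hs]), if_neg (by simp [hu]), if_neg (by simp)]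
        have hB : pvAltMid (m :: t) = pvAltMid t := by
          simp only [pvAltMid, List.map_cons, List.findIdx?_cons]
          rw [if_neg (by simp [hs]), if_neg (by simp [hu])]
          cases h1 : List.findIdx? (fun r => r == "system") (t.map pvRole) with
          | none =>
            cases h2 : List.findIdx? (fun r => r == "user") (t.map pvRole) with
            | none => simp
            | some j => simp [pvSlice_drop, pvSlice_drop2, List.drop_succ_cons]
          | some s =>
            cases h2 : List.findIdx? (fun r => r == "user") (t.map pvRole) with
            | none => simp
            | some j =>
              simp only [Option.map_some, pvSlice_drop, List.drop_succ_cons,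
                List.getElem?_cons_succ]
              have hiff : j + 1 < s + 1 ↔ j < s := by omega
              have hsub : s + 1 - (j + 1) - 1 = s - j - 1 := by omega
              rw [hsub]
              by_cases hlt : j < s <;> simp [hlt, hiff]
        rw [hA, hB, ih]

-- B's comprehension over a range of in-bounds indices with bound b ≤ len is a drop of a take
theorem pvMapRange (xs : List (List (String × String))) (a b : Nat) (hb : b ≤ xs.length) :
    ((PySem.List.pyRange ((a : Nat) : Int) ((b : Nat) : Int) 1).map
        (fun i => PySem.List.pyGetD xs i ([] : List (String × String)))) =
      (xs.take b).drop a := by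
  have hlen : ((xs.take b).length : Int) = ((b : Nat) : Int) := by
    simp [List.length_take, Nat.min_eq_left hb]
  have hcong : ((PySem.List.pyRange ((a : Nat) : Int) ((b : Nat) : Int) 1).map
        (fun i => PySem.List.pyGetD xs i ([] : List (String × String)))) =
      ((PySem.List.pyRange ((a : Nat) : Int) (((xs.take b).length : Nat) : Int) 1).map
        (fun i => PySem.List.pyGetD (xs.take b) i ([] : List (String × String)))) := by
    rw [hlen]
    apply List.map_congr_left
    intro i hi
    rw [PySem.List.mem_pyRange_one] at hi
    have h0 : 0 ≤ i := le_trans (by positivity) hi.1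
    have hib : i < ((b : Nat) : Int) := hi.2
    obtain ⟨k, rfl⟩ := Int.eq_ofNat_of_zero_le h0
    have hk : k < b := by exact_mod_cast hib
    rw [PySem.List.pyGetD_natCast, PySem.List.pyGetD_natCast]
    simp [List.getD, hk]
  rw [hcong, PySem.List.map_pyGetD_pyRange' (xs.take b) _ (by positivity)]
  simp

theorem pvMidAlt (messages : List (List (String × String))) :
    pvAltMid messages = split_conversation_messages_py_alt messages := by
  simp only [pvAltMid, split_conversation_messages_py_alt]
  cases h2 : List.findIdx? (fun r => r == "user") (messages.map pvRole) with
  | none => rfl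
  | some u =>
    have hu : u < messages.length := by
      have := (List.findIdx?_eq_some_iff_findIdx_eq.mp h2).1
      simpa using this
    cases h1 : List.findIdx? (fun r => r == "system") (messages.map pvRole) with
    | none =>
      simp only [Option.map_none]
      have hfil : ∀ i ∈ PySem.List.pyRange ((u : Int) + 1) (messages.length : Int) 1,
          ((none : Option Int) != some i) = true := by intro i _; rfl
      rw [List.filter_eq_self.mpr hfil]
      rw [show ((u : Int) + 1) = ((u + 1 : Nat) : Int) by push_cast; ring]
      rw [pvMapRange messages (u+1) messages.length (le_refl _)]
      simp [pvSlice_drop]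
    | some s =>
      have hslen : s < messages.length := by
        have := (List.findIdx?_eq_some_iff_findIdx_eq.mp h1).1
        simpa using this
      simp only [Option.map_some]
      by_cases hlt : u < s
      · -- split the range at s and at s+1; the singleton [s] is filtered away
        have hsplit : PySem.List.pyRange ((u : Int) + 1) (messages.length : Int) 1 =
            PySem.List.pyRange ((u : Int) + 1) ((s : Nat) : Int) 1 ++
            ((s : Nat) : Int) :: PySem.List.pyRange (((s : Nat) : Int) + 1) (messages.length : Int) 1 := by
          rw [← PySem.List.pyRange_one_cons (by exact_mod_cast hslen)]
          exact PySem.List.pyRange_one_append _ _ _ (by exact_mod_cast hlt) (by exact_mod_cast Nat.le_of_lt hslen)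
        rw [hsplit, List.filter_append, List.filter_cons]
        have hself : (some ((s : Nat) : Int) != some ((s : Nat) : Int)) = false := by simp
        rw [hself]
        rw [if_neg (Bool.false_ne_true)]
        have hf1 : ∀ i ∈ PySem.List.pyRange ((u : Int) + 1) ((s : Nat) : Int) 1,
            (some ((s : Nat) : Int) != some i) = true := by
          intro i hi
          rw [PySem.List.mem_pyRange_one] at hi
          simp only [bne_iff_ne, ne_eq, Option.some.injEq]
          omega
        have hf2 : ∀ i ∈ PySem.List.pyRange (((s : Nat) : Int) + 1) (messages.length : Int) 1,
            (some ((s : Nat) : Int) != some i) = true := by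
          intro i hi
          rw [PySem.List.mem_pyRange_one] at hi
          simp only [bne_iff_ne, ne_eq, Option.some.injEq]
          omega
        rw [List.filter_eq_self.mpr hf1, List.filter_eq_self.mpr hf2, List.map_append]
        rw [show ((u : Int) + 1) = ((u + 1 : Nat) : Int) by push_cast; ring]
        rw [show (((s : Nat) : Int) + 1) = ((s + 1 : Nat) : Int) by push_cast; ring]
        rw [pvMapRange messages (u+1) s (Nat.le_of_lt hslen),
            pvMapRange messages (s+1) messages.length (le_refl _)]
        simp only [hlt, if_true, List.take_length, PySem.List.slice_from_natCast]
        rw [List.eraseIdx_eq_take_drop_succ, List.drop_take, List.drop_drop]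
        have e1 : s - u - 1 = s - (u + 1) := by omega
        have e2 : u + 1 + (s - (u + 1) + 1) = s + 1 := by omega
        rw [e1, e2]
      · -- the first system index is at or before the first user: nothing is filtered
        have hf : ∀ i ∈ PySem.List.pyRange ((u : Int) + 1) (messages.length : Int) 1,
            (some ((s : Nat) : Int) != some i) = true := by
          intro i hi
          rw [PySem.List.mem_pyRange_one] at hi
          simp only [bne_iff_ne, ne_eq, Option.some.injEq]
          omega
        rw [List.filter_eq_self.mpr hf]
        rw [show ((u : Int) + 1) = ((u + 1 : Nat) : Int) by push_cast; ring]
        rw [pvMapRange messages (u+1) messages.length (le_refl _)]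
        simp [hlt, pvSlice_drop]

-- ===== VERDICT (by name: the statement is the Claim_ definition above) =====
theorem split_conversation_messages_py_spec : Claim_equal_split_conversation_messages_py := by
  intro messages _
  unfold Spec_split_conversation_messages_py
  exact (pvMainMid messages).trans (pvMidAlt messages)
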